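-- pv_equiv track=rewrite | github.com/sidorikcode/crypt | АффиныйШифр.py | __check_a
-- ===== SOURCE A (Python) =====
-- class ExtendedEuclidAlgorithm:
--     def __init__(self, number_1, number_2):
--         init_a = max(number_1, number_2)
--         init_b = min(number_1, number_2)
--
--         result = self.__main_method(init_a, init_b)
--         self.d = result[0]
--         self.y2 = result[1]
--
--     def __main_method(self, init_a, init_b):
--         q = None
--         r = None
--         y = None
--         a = init_a
--         b = init_b
--         y2 = 0
--         y1 = 1
--
--         while b != 0:
--             q = a // b
--             r = a % b
--             y = y2 - (q * y1)
--             a = b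
--             b = r
--             y2 = y1
--             y1 = y
--
--         if y2 < 0:
--             y2 += init_a
--         return (a, y2)
--
--     # MARK: - Public methods
--
--     def get_revert_a(self):
--         if self.d > 1:
--             return None
--         else:
--             return self.y2
--
-- def __check_a(a, m):
--     _a = a % m
--     result_euclid_algorinm = ExtendedEuclidAlgorithm(_a, m)
--     d = result_euclid_algorinm.d
--     while d != 1:
--         _a += 1
--         _a = _a % m
--         d = ExtendedEuclidAlgorithm(_a, m).d
--
--     return _a
-- ===== SOURCE B (Python) =====
-- def __check_a(a, m):
--     # Factor m once into its distinct prime divisors, then scan candidates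
--     # cyclically, testing coprimality by prime divisibility instead of
--     # running the extended Euclid algorithm at every step.
--     primes = []
--     n = m
--     p = 2
--     while p * p <= n:
--         if n % p == 0:
--             primes.append(p)
--             while n % p == 0:
--                 n //= p
--         p += 1
--     if n > 1:
--         primes.append(n)
--     _a = a % m
--     while any(_a % p == 0 for p in primes):
--         _a = (_a + 1) % m
--     return _a
-- ===== Notes on version B (the rewrite author's own statement) =====
-- stated objective: alternative
-- what changed: B factors m once into its distinct prime divisors by trial division and tests each candidate residue by prime divisibility, instead of A's running a full extended-Euclid gcd computation for every candidate.
import Mathlib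
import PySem

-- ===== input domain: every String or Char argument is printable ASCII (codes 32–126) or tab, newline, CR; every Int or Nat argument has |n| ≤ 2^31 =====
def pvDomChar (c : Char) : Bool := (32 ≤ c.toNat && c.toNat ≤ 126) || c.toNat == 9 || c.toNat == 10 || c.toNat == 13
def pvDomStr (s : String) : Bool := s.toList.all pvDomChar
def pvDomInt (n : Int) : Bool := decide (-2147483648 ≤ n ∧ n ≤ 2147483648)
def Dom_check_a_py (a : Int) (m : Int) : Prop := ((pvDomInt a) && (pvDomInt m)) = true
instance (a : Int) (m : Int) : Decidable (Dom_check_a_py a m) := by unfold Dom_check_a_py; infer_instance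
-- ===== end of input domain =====

-- B replaces the per-candidate extended-Euclid gcd of A by factoring m once into its
-- distinct prime divisors and testing each candidate by prime divisibility (objective: alternative).

-- ===== PORT A =====
-- while b != 0 of __main_method; fuel is a totality guard (|b| strictly decreases, so |init_b|+1 suffices)
def eeLoop (fuel : Nat) (a b y2 y1 : Int) : Int × Int :=
  match fuel with
  | 0 => (a, y2)
  | fuel + 1 =>
    if b ≠ 0 then
      let q := PySem.Int.floordiv a b
      let r := PySem.Int.mod a b
      let y := y2 - q * y1
      eeLoop fuel b r y1 y
    else (a, y2)

-- __main_method, returning (a, y2); d = .1, y2 = .2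
def eeMain (initA initB : Int) : Int × Int :=
  let res := eeLoop (initB.natAbs + 1) initA initB 0 1
  if res.2 < 0 then (res.1, res.2 + initA) else res

-- ExtendedEuclidAlgorithm.__init__: init_a = max, init_b = min; .d is the first component
def eeD (number1 number2 : Int) : Int := (eeMain (max number1 number2) (min number1 number2)).1

-- while d != 1 of __check_a; fuel is a totality guard (for m ≥ 1 the loop stops within m steps)
def aCandLoop (m : Int) (fuel : Nat) (x : Int) : Int :=
  match fuel with
  | 0 => x
  | fuel + 1 =>
    if eeD x m ≠ 1 then aCandLoop m fuel (PySem.Int.mod (x + 1) m) else x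

def check_a_py (a : Int) (m : Int) : Int :=
  aCandLoop m (m.natAbs + 1) (PySem.Int.mod a m)

-- ===== PORT B =====
-- inner 'while n % p == 0: n //= p'; fuel is a totality guard (n shrinks, |n|+1 suffices)
def divOut (fuel : Nat) (n p : Int) : Int :=
  match fuel with
  | 0 => n
  | fuel + 1 =>
    if PySem.Int.mod n p = 0 then divOut fuel (PySem.Int.floordiv n p) p else n

-- outer 'while p * p <= n' trial-division loop; fuel is a totality guard (p grows, n shrinks)
def factorLoop (fuel : Nat) (p n : Int) (primes : List Int) : List Int × Int :=
  match fuel with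
  | 0 => (primes, n)
  | fuel + 1 =>
    if p * p ≤ n then
      if PySem.Int.mod n p = 0 then
        factorLoop fuel (p + 1) (divOut (n.natAbs + 1) n p) (primes ++ [p])
      else factorLoop fuel (p + 1) n primes
    else (primes, n)

-- the primes list Source B has built when its factoring loop ends ('if n > 1: primes.append(n)')
def primesOf (m : Int) : List Int :=
  let r := factorLoop (m.natAbs + 2) 2 m []
  if r.2 > 1 then r.1 ++ [r.2] else r.1

-- 'while any(_a % p == 0 for p in primes): _a = (_a + 1) % m'; fuel is a totality guard
def bCandLoop (m : Int) (primes : List Int) (fuel : Nat) (x : Int) : Int :=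
  match fuel with
  | 0 => x
  | fuel + 1 =>
    if primes.any (fun p => PySem.Int.mod x p == 0) then
      bCandLoop m primes fuel (PySem.Int.mod (x + 1) m)
    else x

def check_a_py_alt (a : Int) (m : Int) : Int :=
  bCandLoop m (primesOf m) (m.natAbs + 1) (PySem.Int.mod a m)

-- ===== PRECONDITION & SPEC =====
-- A raises ZeroDivisionError at m = 0 and loops forever for m < 0 (its gcd comes out ≤ 0, never 1),
-- so Pre_ admits exactly m ≥ 1, i.e. every input on which the Python A returns.
def Pre_check_a_py (a : Int) (m : Int) : Prop := 1 ≤ m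
instance (a : Int) (m : Int) : Decidable (Pre_check_a_py a m) := by unfold Pre_check_a_py; infer_instance
def pvWitness_check_a_py : Int × Int := (3, 10)

def Spec_check_a_py (a : Int) (m : Int) (out : Int) : Prop := out = check_a_py_alt a m
instance (a : Int) (m : Int) (out : Int) : Decidable (Spec_check_a_py a m out) := by unfold Spec_check_a_py; infer_instance

-- ===== CLAIM (what is proved, stated in full; the proofs are below) =====
def Claim_equal_check_a_py : Prop := ∀ (a : Int) (m : Int), Dom_check_a_py a m → Pre_check_a_py a m → Spec_check_a_py a m (check_a_py a m)

-- ===== LEMMAS AND PROOFS =====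

-- A's Euclid loop computes the gcd (first component) for nonnegative arguments.
theorem eeLoop_fst (fuel : Nat) : ∀ (a b y2 y1 : Int), 0 ≤ a → 0 ≤ b → b.natAbs < fuel →
    (eeLoop fuel a b y2 y1).1 = (Int.gcd a b : Int) := by
  induction fuel with
  | zero => intro a b y2 y1 _ _ h; omega
  | succ fuel ih =>
    intro a b y2 y1 ha hb hfuel
    by_cases hb0 : b = 0
    · subst hb0
      simp [eeLoop, Int.natAbs_of_nonneg ha]
    · have hbpos : 0 < b := by omega
      have hr : PySem.Int.mod a b = a % b := PySem.Int.mod_eq_emod_of_pos hbpos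
      have hrn : 0 ≤ PySem.Int.mod a b := PySem.Int.mod_nonneg a hbpos
      have hrlt : PySem.Int.mod a b < b := PySem.Int.mod_lt a hbpos
      simp only [eeLoop, if_pos hb0]
      rw [ih b (PySem.Int.mod a b) _ _ hb hrn (by omega)]
      rw [hr]
      rw [Int.gcd_comm b (a % b), Int.gcd_emod]

-- A's ExtendedEuclidAlgorithm(x, m).d is gcd(m, x) when 0 ≤ x < m.
theorem eeD_eq_gcd (x m : Int) (hx : 0 ≤ x) (hxm : x < m) :
    eeD x m = (Int.gcd m x : Int) := by
  have hmax : max x m = m := max_eq_right (le_of_lt hxm)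
  have hmin : min x m = x := min_eq_left (le_of_lt hxm)
  unfold eeD eeMain
  rw [hmax, hmin]
  have h1 : (eeLoop (x.natAbs + 1) m x 0 1).1 = (Int.gcd m x : Int) :=
    eeLoop_fst _ m x 0 1 (by omega) hx (by omega)
  dsimp only
  split
  · exact h1
  · exact h1

-- B's inner division loop: the result is a positive divisor of n no longer divisible by p,
-- and every prime divisor of n divides the result or divides p.
theorem divOut_spec (fuel : Nat) : ∀ (n p : Int), 1 ≤ n → 2 ≤ p → n.natAbs < fuel →
    1 ≤ divOut fuel n p ∧ divOut fuel n p ∣ n ∧ ¬ (p ∣ divOut fuel n p) ∧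
    (∀ q : Nat, q.Prime → (q : Int) ∣ n → (q : Int) ∣ divOut fuel n p ∨ (q : Int) ∣ p) := by
  induction fuel with
  | zero => intro n p hn _ h; omega
  | succ fuel ih =>
    intro n p hn hp hfuel
    by_cases hd : PySem.Int.mod n p = 0
    · have hdvd : p ∣ n := (PySem.Int.mod_eq_zero_iff_dvd n p).mp hd
      obtain ⟨k, hk⟩ := hdvd
      have hk1 : 1 ≤ k := by nlinarith
      have hfl : PySem.Int.floordiv n p = k := by
        rw [PySem.Int.floordiv_eq_ediv_of_pos (by omega), hk]
        exact Int.mul_ediv_cancel_left k (by omega)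
      have hklt : k < n := by nlinarith
      have hres : divOut (fuel + 1) n p = divOut fuel k p := by
        simp only [divOut, if_pos hd, hfl]
      obtain ⟨h1, h2, h3, h4⟩ := ih k p hk1 hp (by omega)
      refine ⟨hres ▸ h1, hres ▸ (h2.trans ⟨p, by linarith [hk]⟩), hres ▸ h3, ?_⟩
      intro q hq hqn
      rw [hres]
      have : q ∣ (p * k).natAbs := by
        rw [← hk]; exact Int.natCast_dvd.mp hqn
      rw [Int.natAbs_mul] at this
      rcases (Nat.Prime.dvd_mul hq).mp this with hqp | hqk
      · exact Or.inr (Int.natCast_dvd.mpr hqp)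
      · exact h4 q hq (Int.natCast_dvd.mpr hqk)
    · have hres : divOut (fuel + 1) n p = n := by simp only [divOut, if_neg hd]
      rw [hres]
      exact ⟨hn, dvd_refl n, fun hc => hd ((PySem.Int.mod_eq_zero_iff_dvd n p).mpr hc),
        fun q _ hqn => Or.inl hqn⟩

-- When the trial-division loop stops (n < p²) the remainder n is 1 or a prime.
theorem stop_spec (p n : Int) (hp : 2 ≤ p) (hn : 1 ≤ n)
    (hns : ∀ q : Nat, q.Prime → (q : Int) ∣ n → p ≤ (q : Int)) (hstop : n < p * p) :
    n = 1 ∨ (1 < n ∧ ∀ q : Nat, q.Prime → (q : Int) ∣ n → (q : Int) = n) := by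
  rcases eq_or_lt_of_le hn with h1 | h1
  · exact Or.inl h1.symm
  · refine Or.inr ⟨h1, ?_⟩
    intro q hq hqn
    obtain ⟨k, hk⟩ := hqn
    have hq2 : (2 : Int) ≤ q := by exact_mod_cast hq.two_le
    have hk1 : 1 ≤ k := by nlinarith
    rcases eq_or_lt_of_le hk1 with hk2 | hk2
    · rw [hk, ← hk2, mul_one]
    · exfalso
      have hkne : k.natAbs ≠ 1 := by omega
      obtain ⟨q', hq', hq'k⟩ := Nat.exists_prime_and_dvd hkne
      have hq'ki : (q' : Int) ∣ k := Int.natCast_dvd.mpr hq'k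
      have hq'n : (q' : Int) ∣ n := hq'ki.trans ⟨q, by linarith [hk]⟩
      have hq'p : p ≤ (q' : Int) := hns q' hq' hq'n
      have hq'le : (q' : Int) ≤ k := Int.le_of_dvd (by omega) hq'ki
      have hqp : p ≤ (q : Int) := hns q hq ⟨k, hk⟩
      have : p * p ≤ q * k := by
        have := mul_le_mul hqp (le_trans hq'p hq'le) (by omega) (by omega)
        linarith
      rw [hk] at hstop
      omega

-- Invariant of B's trial-division loop: members of the produced list are divisors ≥ 2 of n,
-- every prime divisor of n appears in the list or divides the final n, the final n is a
-- positive divisor of n, and the final n is 1 or has itself as its only prime divisor.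
theorem factorLoop_spec (fuel : Nat) : ∀ (p n : Int) (acc : List Int), 2 ≤ p → 1 ≤ n →
    (∀ q : Nat, q.Prime → (q : Int) ∣ n → p ≤ (q : Int)) → n.natAbs + 1 < fuel + p.natAbs →
    (∀ e ∈ (factorLoop fuel p n acc).1, e ∈ acc ∨ (2 ≤ e ∧ e ∣ n)) ∧
    (∀ e ∈ acc, e ∈ (factorLoop fuel p n acc).1) ∧
    (∀ q : Nat, q.Prime → (q : Int) ∣ n →
      (q : Int) ∈ (factorLoop fuel p n acc).1 ∨ (q : Int) ∣ (factorLoop fuel p n acc).2) ∧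
    (1 ≤ (factorLoop fuel p n acc).2 ∧ (factorLoop fuel p n acc).2 ∣ n) ∧
    ((factorLoop fuel p n acc).2 = 1 ∨ (1 < (factorLoop fuel p n acc).2 ∧
      ∀ q : Nat, q.Prime → (q : Int) ∣ (factorLoop fuel p n acc).2 → (q : Int) = (factorLoop fuel p n acc).2)) := by
  induction fuel with
  | zero =>
    intro p n acc hp hn hns hfuel
    have hnp : n < p := by omega
    have hstop : n < p * p := by nlinarith
    simp only [factorLoop]
    exact ⟨fun e he => Or.inl he, fun e he => he, fun q hq hqn => Or.inr hqn,
      ⟨hn, dvd_refl n⟩, stop_spec p n hp hn hns hstop⟩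
  | succ fuel ih =>
    intro p n acc hp hn hns hfuel
    by_cases hc : p * p ≤ n
    · by_cases hd : PySem.Int.mod n p = 0
      · have hdvd : p ∣ n := (PySem.Int.mod_eq_zero_iff_dvd n p).mp hd
        -- p is prime here: every prime divisor of n is ≥ p, and p has a prime divisor ≤ p dividing n
        have hpabs : p.natAbs ≠ 1 := by omega
        obtain ⟨q0, hq0, hq0p⟩ := Nat.exists_prime_and_dvd hpabs
        have hq0pi : (q0 : Int) ∣ p := Int.natCast_dvd.mpr hq0p
        have hq0n : (q0 : Int) ∣ n := hq0pi.trans hdvd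
        have hq0ge : p ≤ (q0 : Int) := hns q0 hq0 hq0n
        have hq0le : (q0 : Int) ≤ p := Int.le_of_dvd (by omega) hq0pi
        have hq0eq : (q0 : Int) = p := le_antisymm hq0le hq0ge
        have hpprime : p.natAbs.Prime := by
          have : q0 = p.natAbs := by omega
          rwa [this] at hq0
        have hprime_eq : ∀ q : Nat, q.Prime → (q : Int) ∣ p → (q : Int) = p := by
          intro q hq hqp
          have : q ∣ p.natAbs := Int.natCast_dvd.mp hqp
          have := (Nat.prime_dvd_prime_iff_eq hq hpprime).mp this
          omega
        set n1 := divOut (n.natAbs + 1) n p with hn1def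
        obtain ⟨hn1pos, hn1dvd, hn1np, hn1tr⟩ := divOut_spec (n.natAbs + 1) n p hn hp (by omega)
        have hn1le : n1 ≤ n := Int.le_of_dvd (by omega) hn1dvd
        have hn1lt : n1 < n := by
          rcases eq_or_lt_of_le hn1le with h | h
          · exfalso; exact hn1np (by rw [← hn1def, h]; exact hdvd)
          · exact h
        have hres : factorLoop (fuel + 1) p n acc = factorLoop fuel (p + 1) n1 (acc ++ [p]) := by
          simp only [factorLoop, if_pos hc, if_pos hd, hn1def]
        have hns1 : ∀ q : Nat, q.Prime → (q : Int) ∣ n1 → p + 1 ≤ (q : Int) := by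
          intro q hq hqn1
          have hge := hns q hq (hqn1.trans hn1dvd)
          rcases eq_or_lt_of_le hge with h | h
          · exfalso; exact hn1np (by rw [← hn1def, h]; exact hqn1)
          · omega
        obtain ⟨ia, imono, ib, ic, id⟩ := ih (p + 1) n1 (acc ++ [p]) (by omega) hn1pos hns1 (by omega)
        rw [hres]
        refine ⟨?_, ?_, ?_, ⟨ic.1, ic.2.trans hn1dvd⟩, id⟩
        · intro e he
          rcases ia e he with hacc | ⟨he2, hedvd⟩
          · rcases List.mem_append.mp hacc with h | h
            · exact Or.inl h
            · have : e = p := List.mem_singleton.mp h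
              exact Or.inr ⟨this ▸ hp, this ▸ hdvd⟩
          · exact Or.inr ⟨he2, hedvd.trans hn1dvd⟩
        · intro e he
          exact imono e (List.mem_append.mpr (Or.inl he))
        · intro q hq hqn
          rcases hn1tr q hq hqn with hqn1 | hqp
          · exact ib q hq hqn1
          · left
            rw [hprime_eq q hq hqp]
            exact imono p (List.mem_append.mpr (Or.inr (List.mem_singleton.mpr rfl)))
      · have hres : factorLoop (fuel + 1) p n acc = factorLoop fuel (p + 1) n acc := by
          simp only [factorLoop, if_pos hc, if_neg hd]
        have hnp : ¬ (p ∣ n) := fun h => hd ((PySem.Int.mod_eq_zero_iff_dvd n p).mpr h)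
        have hns1 : ∀ q : Nat, q.Prime → (q : Int) ∣ n → p + 1 ≤ (q : Int) := by
          intro q hq hqn
          have hge := hns q hq hqn
          rcases eq_or_lt_of_le hge with h | h
          · exfalso; exact hnp (by rw [h]; exact hqn)
          · omega
        rw [hres]
        exact ih (p + 1) n acc (by omega) hn hns1 (by omega)
    · have hres : factorLoop (fuel + 1) p n acc = (acc, n) := by
        simp only [factorLoop, if_neg hc]
      rw [hres]
      exact ⟨fun e he => Or.inl he, fun e he => he, fun q hq hqn => Or.inr hqn,
        ⟨hn, dvd_refl n⟩, stop_spec p n hp hn hns (by omega)⟩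

-- Source B's prime list for m ≥ 1: its members are divisors ≥ 2 of m and it contains every prime divisor of m.
theorem primesOf_spec (m : Int) (hm : 1 ≤ m) :
    (∀ e ∈ primesOf m, 2 ≤ e ∧ e ∣ m) ∧
    (∀ q : Nat, q.Prime → (q : Int) ∣ m → (q : Int) ∈ primesOf m) := by
  have hns : ∀ q : Nat, q.Prime → (q : Int) ∣ m → (2 : Int) ≤ (q : Int) := by
    intro q hq _; exact_mod_cast hq.two_le
  obtain ⟨ha, _, hb, hc, hd⟩ :=
    factorLoop_spec (m.natAbs + 2) 2 m [] (by omega) hm hns (by omega)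
  set r := factorLoop (m.natAbs + 2) 2 m [] with hr
  constructor
  · intro e he
    unfold primesOf at he
    rw [← hr] at he
    by_cases h2 : r.2 > 1
    · rw [if_pos h2] at he
      rcases List.mem_append.mp he with h | h
      · rcases ha e h with habs | hok
        · simp at habs
        · exact hok
      · have : e = r.2 := List.mem_singleton.mp h
        exact ⟨by omega, this ▸ hc.2⟩
    · rw [if_neg h2] at he
      rcases ha e he with habs | hok
      · simp at habs
      · exact hok
  · intro q hq hqm
    unfold primesOf
    rw [← hr]
    rcases hb q hq hqm with hmem | hdvd
    · by_cases h2 : r.2 > 1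
      · rw [if_pos h2]; exact List.mem_append.mpr (Or.inl hmem)
      · rw [if_neg h2]; exact hmem
    · rcases hd with h1 | ⟨h1, h2⟩
      · exfalso
        rw [h1] at hdvd
        have : q ∣ 1 := by exact_mod_cast Int.natCast_dvd.mp hdvd
        have := Nat.eq_one_of_dvd_one this
        exact hq.ne_one this
      · rw [if_pos (by omega : r.2 > 1)]
        rw [h2 q hq hdvd]
        exact List.mem_append.mpr (Or.inr (List.mem_singleton.mpr rfl))

-- B's loop test is equivalent to 'gcd(m, x) ≠ 1'.
theorem bcond_iff (m x : Int) (hm : 1 ≤ m) :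
    ((primesOf m).any (fun p => PySem.Int.mod x p == 0) = true) ↔ Int.gcd m x ≠ 1 := by
  obtain ⟨hmem, hcover⟩ := primesOf_spec m hm
  constructor
  · intro h hg
    obtain ⟨p, hpL, hpx⟩ := List.any_eq_true.mp h
    have hpdx : p ∣ x := (PySem.Int.mod_eq_zero_iff_dvd x p).mp (by simpa using hpx)
    obtain ⟨hp2, hpdm⟩ := hmem p hpL
    have : p ∣ (Int.gcd m x : Int) := Int.dvd_coe_gcd hpdm hpdx
    rw [hg] at this
    have := Int.le_of_dvd (by norm_num) this
    omega
  · intro hg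
    have hg0 : Int.gcd m x ≠ 0 := Int.gcd_ne_zero_left (by omega)
    obtain ⟨q, hq, hqg⟩ := Nat.exists_prime_and_dvd hg
    have hqm : (q : Int) ∣ m := (Int.natCast_dvd_natCast.mpr hqg |>.trans (Int.gcd_dvd_left ..) : (q:Int) ∣ m)
    have hqx : (q : Int) ∣ x := (Int.natCast_dvd_natCast.mpr hqg |>.trans (Int.gcd_dvd_right ..) : (q:Int) ∣ x)
    apply List.any_eq_true.mpr
    exact ⟨(q : Int), hcover q hq hqm, by
      simp only [beq_iff_eq]
      exact (PySem.Int.mod_eq_zero_iff_dvd x (q : Int)).mpr hqx⟩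

-- The two candidate loops agree step by step (same fuel, same start, equivalent tests).
theorem loops_eq (m : Int) (hm : 1 ≤ m) (fuel : Nat) : ∀ x : Int, 0 ≤ x → x < m →
    aCandLoop m fuel x = bCandLoop m (primesOf m) fuel x := by
  induction fuel with
  | zero => intro x _ _; rfl
  | succ fuel ih =>
    intro x hx hxm
    have hA : (eeD x m ≠ 1) ↔ Int.gcd m x ≠ 1 := by
      rw [eeD_eq_gcd x m hx hxm]
      constructor
      · intro h hg; exact h (by rw [hg]; rfl)
      · intro h hc; exact h (by exact_mod_cast hc)
    have hB := bcond_iff m x hm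
    simp only [aCandLoop, bCandLoop]
    by_cases hg : Int.gcd m x = 1
    · rw [if_neg (fun hc => (hA.mp hc) hg), if_neg (fun hc => (hB.mp hc) hg)]
    · rw [if_pos (hA.mpr hg), if_pos (hB.mpr hg)]
      exact ih (PySem.Int.mod (x + 1) m) (PySem.Int.mod_nonneg (x + 1) (by omega))
        (PySem.Int.mod_lt (x + 1) (by omega))

-- ===== VERDICT (by name: the statement is the Claim_ definition above) =====
theorem check_a_py_spec : Claim_equal_check_a_py := by
  intro a m _ hpre
  unfold Spec_check_a_py check_a_py check_a_py_alt
  have hm : 1 ≤ m := hpre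
  exact loops_eq m hm (m.natAbs + 1) (PySem.Int.mod a m)
    (PySem.Int.mod_nonneg a (by omega)) (PySem.Int.mod_lt a (by omega))
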